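-- pv_equiv track=rewrite | github.com/rajiv256/magellan | backend/generate_oligo_sequences.py | has_problematic_motifs
-- ===== SOURCE A (Python) =====
-- def has_problematic_motifs(sequence: str) -> bool:
--     """Check for known problematic sequence motifs"""
--     seq = sequence.upper()
--
--     # 1. Common restriction enzyme sites (might interfere with cloning)
--     restriction_sites = [
--         'GAATTC',  # EcoRI
--         'GGATCC',  # BamHI
--         'AAGCTT',  # HindIII
--         'CTGCAG',  # PstI
--         'GTCGAC',  # SalI
--         'CCATGG',  # NcoI
--         'GCGGCCGC',  # NotI
--         'TCTAGA',  # XbaI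
--     ]
--
--     for site in restriction_sites:
--         if site in seq:
--             return True
--
--     # 2. Polymerase problematic sequences
--     problematic_motifs = [
--         'GGGGGG',  # G-quadruplex forming
--         'CCCCCC',  # Strong secondary structure
--         'AAAAAA',  # Weak region
--         'TTTTTT',  # Termination signal-like
--     ]
--
--     for motif in problematic_motifs:
--         if motif in seq:
--             return True
--
--     # 3. Avoid sequences similar to common primers
--     common_primers = [
--         'GTAAAACGACGGCCAGT',  # M13 forward
--         'CAGGAAACAGCTATGAC',  # M13 reverse
--         'TGTAAAACGACGGCCAGT',  # M13(-20) forward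
--     ]
--
--     for primer in common_primers:
--         # Check for significant overlap (>80% similarity in 8+ bp window)
--         if len(seq) >= 8:
--             for i in range(len(seq) - 7):
--                 window = seq[i:i + 8]
--                 for p in common_primers:
--                     if len(p) >= 8:
--                         for j in range(len(p) - 7):
--                             p_window = p[j:j + 8]
--                             matches = sum(1 for a, b in zip(window, p_window) if a == b)
--                             if matches >= 7:  # >85% similarity
--                                 return True
--
--     return False
-- ===== SOURCE B (Python) =====
-- def has_problematic_motifs(sequence: str) -> bool:
--     """Check for known problematic sequence motifs"""
--     seq = sequence.upper()
--
--     # restriction sites + polymerase-problematic motifs: plain substring checks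
--     bad_substrings = [
--         'GAATTC', 'GGATCC', 'AAGCTT', 'CTGCAG', 'GTCGAC', 'CCATGG',
--         'GCGGCCGC', 'TCTAGA',
--         'GGGGGG', 'CCCCCC', 'AAAAAA', 'TTTTTT',
--     ]
--     for site in bad_substrings:
--         if site in seq:
--             return True
--
--     # primer similarity: index every 8-mer of the primers once, then test each
--     # window of seq by membership of the window or of one of its Hamming-1
--     # neighbours over the DNA alphabet (>=7/8 matching positions).
--     primers = [
--         'GTAAAACGACGGCCAGT',
--         'CAGGAAACAGCTATGAC',
--         'TGTAAAACGACGGCCAGT',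
--     ]
--     kmers = {p[j:j + 8] for p in primers for j in range(len(p) - 7)}
--     if len(seq) >= 8:
--         for i in range(len(seq) - 7):
--             w = seq[i:i + 8]
--             if w in kmers:
--                 return True
--             for k in range(8):
--                 for c in 'ACGT':
--                     if w[:k] + c + w[k + 1:] in kmers:
--                         return True
--     return False
-- ===== Notes on version B (the rewrite author's own statement) =====
-- stated objective: alternative
-- what changed: The quadruple-nested primer-similarity scan (every sequence window against every window of every primer, counting matching characters, under a redundant outer loop over the primers) is replaced by a set of all primer 8-mers built once and queried with each sequence window and its Hamming-1 neighbours over A/C/G/T; the substring checks are kept, flattened into one list.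
import Mathlib
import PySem

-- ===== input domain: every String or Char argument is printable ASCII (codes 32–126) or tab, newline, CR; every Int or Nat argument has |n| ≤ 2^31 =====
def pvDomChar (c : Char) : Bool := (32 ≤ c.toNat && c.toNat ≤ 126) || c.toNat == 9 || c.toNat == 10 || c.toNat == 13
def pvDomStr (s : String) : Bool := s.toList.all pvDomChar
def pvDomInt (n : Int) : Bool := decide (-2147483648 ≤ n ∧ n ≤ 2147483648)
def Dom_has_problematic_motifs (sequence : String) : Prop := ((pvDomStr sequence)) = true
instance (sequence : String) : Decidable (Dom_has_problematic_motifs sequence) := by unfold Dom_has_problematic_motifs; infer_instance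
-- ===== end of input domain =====

-- B replaces A's quadruple-nested primer-similarity scan by a precomputed set of primer
-- 8-mers queried with each sequence window and its Hamming-1 A/C/G/T neighbours
-- (same substring checks, flattened into one list; trades match-counting for set lookups).

-- ===== PORT A =====
def pvSitesA : List (List Char) :=
  ["GAATTC".toList, "GGATCC".toList, "AAGCTT".toList, "CTGCAG".toList,
   "GTCGAC".toList, "CCATGG".toList, "GCGGCCGC".toList, "TCTAGA".toList]

def pvMotifsA : List (List Char) :=
  ["GGGGGG".toList, "CCCCCC".toList, "AAAAAA".toList, "TTTTTT".toList]

def pvPrimersA : List (List Char) :=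
  ["GTAAAACGACGGCCAGT".toList, "CAGGAAACAGCTATGAC".toList, "TGTAAAACGACGGCCAGT".toList]

-- sum(1 for a, b in zip(window, p_window) if a == b): the count of agreeing positions
def pvMatchesA (w p : List Char) : Nat := (w.zip p).countP (fun ab => ab.1 == ab.2)

def has_problematic_motifs (sequence : String) : Bool :=
  let seq := (PySem.Str.upper sequence).toList
  if pvSitesA.any (fun site => PySem.Chars.isIn site seq) then true
  else if pvMotifsA.any (fun motif => PySem.Chars.isIn motif seq) then true
  else
    pvPrimersA.any (fun _primer =>
      decide (8 ≤ seq.length) &&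
      (PySem.List.pyRange 0 (PySem.List.len seq - 7) 1).any (fun i =>
        let window := PySem.List.slice seq (some i) (some (i + 8))
        pvPrimersA.any (fun p =>
          decide (8 ≤ p.length) &&
          (PySem.List.pyRange 0 (PySem.List.len p - 7) 1).any (fun j =>
            let p_window := PySem.List.slice p (some j) (some (j + 8))
            decide (7 ≤ pvMatchesA window p_window)))))

-- ===== PORT B =====
def pvBadB : List (List Char) :=
  ["GAATTC".toList, "GGATCC".toList, "AAGCTT".toList, "CTGCAG".toList,
   "GTCGAC".toList, "CCATGG".toList, "GCGGCCGC".toList, "TCTAGA".toList,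
   "GGGGGG".toList, "CCCCCC".toList, "AAAAAA".toList, "TTTTTT".toList]

def pvPrimersB : List (List Char) :=
  ["GTAAAACGACGGCCAGT".toList, "CAGGAAACAGCTATGAC".toList, "TGTAAAACGACGGCCAGT".toList]

-- {p[j:j+8] for p in primers for j in range(len(p) - 7)}
def pvKmerListB : List (List Char) :=
  pvPrimersB.flatMap (fun p =>
    (PySem.List.pyRange 0 (PySem.List.len p - 7) 1).map (fun j =>
      PySem.List.slice p (some j) (some (j + 8))))

def pvKmersB : PySem.Set (List Char) := PySem.Set.ofList pvKmerListB

def has_problematic_motifs_alt (sequence : String) : Bool :=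
  let seq := (PySem.Str.upper sequence).toList
  pvBadB.any (fun site => PySem.Chars.isIn site seq) ||
  (decide (8 ≤ seq.length) &&
    (PySem.List.pyRange 0 (PySem.List.len seq - 7) 1).any (fun i =>
      let w := PySem.List.slice seq (some i) (some (i + 8))
      PySem.Set.contains pvKmersB w ||
      (PySem.List.pyRange 0 8 1).any (fun k =>
        ("ACGT".toList).any (fun c =>
          PySem.Set.contains pvKmersB
            (PySem.List.slice w none (some k) ++ [c] ++ PySem.List.slice w (some (k + 1)) none)))))

-- ===== PRECONDITION & SPEC =====
def Spec_has_problematic_motifs (sequence : String) (out : Bool) : Prop := out = has_problematic_motifs_alt sequence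
instance (sequence : String) (out : Bool) : Decidable (Spec_has_problematic_motifs sequence out) := by unfold Spec_has_problematic_motifs; infer_instance

-- ===== CLAIM (what is proved, stated in full; the proofs are below) =====
def Claim_equal_has_problematic_motifs : Prop := ∀ (sequence : String), Dom_has_problematic_motifs sequence → Spec_has_problematic_motifs sequence (has_problematic_motifs sequence)

-- ===== LEMMAS AND PROOFS =====

-- the flattened substring list of B is A's two lists checked in order
theorem pvBad_split (s : List Char) :
    pvBadB.any (fun site => PySem.Chars.isIn site s) =
      (pvSitesA.any (fun site => PySem.Chars.isIn site s) ||
       pvMotifsA.any (fun motif => PySem.Chars.isIn motif s)) := by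
  simp [pvBadB, pvSitesA, pvMotifsA, Bool.or_assoc]

theorem pvPrimersB_eq : pvPrimersB = pvPrimersA := rfl

theorem pvKmer_len : ∀ pw ∈ pvKmerListB, pw.length = 8 := by decide

theorem pvKmer_acgt : ∀ pw ∈ pvKmerListB, ∀ k : Nat, k < 8 → pw.getD k ' ' ∈ "ACGT".toList := by decide

theorem pvPrimers_len : ∀ p ∈ pvPrimersA, (8:Nat) ≤ p.length := by decide


theorem pvMatches_le (u v : List Char) : pvMatchesA u v ≤ u.length := by
  calc pvMatchesA u v ≤ (u.zip v).length := List.countP_le_length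
  _ ≤ u.length := by simp [List.length_zip]

theorem pvMatches_refl (u : List Char) : pvMatchesA u u = u.length := by
  induction u with
  | nil => rfl
  | cons a t ih => simp [pvMatchesA] at ih ⊢; omega

theorem pvMatches_full (u v : List Char) (h : u.length = v.length)
    (hm : u.length ≤ pvMatchesA u v) : u = v := by
  induction u generalizing v with
  | nil => cases v with | nil => rfl | cons b s => simp at h
  | cons a t ih =>
    cases v with
    | nil => simp at h
    | cons b s =>
      simp only [List.length_cons] at h
      have hle := pvMatches_le t s
      by_cases hab : a = b
      · subst hab
        simp [pvMatchesA] at hm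
        have : t = s := ih s (by omega) (by simp [pvMatchesA]; omega)
        simp [this]
      · exfalso
        simp [pvMatchesA, hab] at hm
        simp only [pvMatchesA] at hle
        omega

theorem pvMatches_set (u : List Char) (k : Nat) (c : Char) (hk : k < u.length) :
    u.length - 1 ≤ pvMatchesA u (u.set k c) := by
  induction u generalizing k with
  | nil => simp at hk
  | cons a t ih =>
    cases k with
    | zero =>
      have h := pvMatches_refl t
      simp [pvMatchesA, List.countP_cons] at h ⊢
      omega
    | succ k =>
      have h := ih k (by simpa using hk)
      simp [pvMatchesA] at h ⊢
      omega

theorem pvMatches_decomp (u v : List Char) (h0 : 0 < u.length) (h : u.length = v.length)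
    (hm : u.length - 1 ≤ pvMatchesA u v) :
    ∃ k : Nat, k < u.length ∧ u.set k (v.getD k ' ') = v := by
  induction u generalizing v with
  | nil => simp at h0
  | cons a t ih =>
    cases v with
    | nil => simp at h
    | cons b s =>
      simp only [List.length_cons] at h
      by_cases hts : t = s
      · subst hts
        exact ⟨0, by simp, by simp⟩
      · have hlt : pvMatchesA t s < t.length := by
          rcases Nat.lt_or_ge (pvMatchesA t s) t.length with hl | hg
          · exact hl
          · exact absurd (pvMatches_full t s (by omega) hg) hts
        by_cases hab : a = b
        · subst hab
          simp [pvMatchesA] at hm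
          have h0t : 0 < t.length := by
            cases t with
            | nil => cases s with | nil => exact absurd rfl hts | cons => simp at h
            | cons => simp
          obtain ⟨k, hk, hset⟩ := ih s h0t (by omega) (by simp only [pvMatchesA]; omega)
          refine ⟨k + 1, by simpa using hk, ?_⟩
          rw [List.getD_cons_succ, List.set_cons_succ, hset]
        · simp [pvMatchesA, hab] at hm
          exact absurd (pvMatches_full t s (by omega) (by simp only [pvMatchesA]; omega)) hts

theorem pvContains_iff (x : List Char) :
    PySem.Set.contains pvKmersB x = true ↔ x ∈ pvKmerListB := by
  rw [pvKmersB, PySem.Set.contains_iff]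
  exact PySem.Set.mem_ofList pvKmerListB x

theorem pvMemKmer (x : List Char) :
    x ∈ pvKmerListB ↔ ∃ p ∈ pvPrimersA, ∃ j ∈ PySem.List.pyRange 0 (PySem.List.len p - 7) 1,
      x = PySem.List.slice p (some j) (some (j + 8)) := by
  rw [pvKmerListB, pvPrimersB_eq]
  simp only [List.mem_flatMap, List.mem_map]
  constructor
  · rintro ⟨p, hp, j, hj, rfl⟩
    exact ⟨p, hp, j, hj, rfl⟩
  · rintro ⟨p, hp, j, hj, rfl⟩
    exact ⟨p, hp, j, hj, rfl⟩

-- w[:k] + c + w[k+1:] is w with position k replaced by c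
theorem pvNeighbor_eq (w : List Char) (hw : w.length = 8) (k : Int) (h0 : 0 ≤ k) (h8 : k < 8) (c : Char) :
    PySem.List.slice w none (some k) ++ [c] ++ PySem.List.slice w (some (k + 1)) none =
      w.set k.toNat c := by
  rw [PySem.List.slice_to w h0, PySem.List.slice_from w (by omega)]
  have h1 : (k + 1).toNat = k.toNat + 1 := by omega
  rw [h1, List.set_eq_take_cons_drop c (by omega)]
  simp

-- the two primer-similarity tests agree on every 8-character window
theorem pvWindow_eq (w : List Char) (hw : w.length = 8) :
    (pvPrimersA.any (fun p =>
        decide (8 ≤ p.length) &&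
        (PySem.List.pyRange 0 (PySem.List.len p - 7) 1).any (fun j =>
          decide (7 ≤ pvMatchesA w (PySem.List.slice p (some j) (some (j + 8))))))) =
    (PySem.Set.contains pvKmersB w ||
      (PySem.List.pyRange 0 8 1).any (fun k =>
        ("ACGT".toList).any (fun c =>
          PySem.Set.contains pvKmersB
            (PySem.List.slice w none (some k) ++ [c] ++ PySem.List.slice w (some (k + 1)) none)))) := by
  have hA : (pvPrimersA.any (fun p =>
        decide (8 ≤ p.length) &&
        (PySem.List.pyRange 0 (PySem.List.len p - 7) 1).any (fun j =>
          decide (7 ≤ pvMatchesA w (PySem.List.slice p (some j) (some (j + 8))))))) = true ↔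
      ∃ pw ∈ pvKmerListB, 7 ≤ pvMatchesA w pw := by
    simp only [List.any_eq_true, Bool.and_eq_true, decide_eq_true_eq]
    constructor
    · rintro ⟨p, hp, -, j, hj, h7⟩
      exact ⟨_, (pvMemKmer _).mpr ⟨p, hp, j, hj, rfl⟩, h7⟩
    · rintro ⟨pw, hpw, h7⟩
      obtain ⟨p, hp, j, hj, rfl⟩ := (pvMemKmer _).mp hpw
      exact ⟨p, hp, pvPrimers_len p hp, j, hj, h7⟩
  have hB : (PySem.Set.contains pvKmersB w ||
      (PySem.List.pyRange 0 8 1).any (fun k =>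
        ("ACGT".toList).any (fun c =>
          PySem.Set.contains pvKmersB
            (PySem.List.slice w none (some k) ++ [c] ++ PySem.List.slice w (some (k + 1)) none)))) = true ↔
      (w ∈ pvKmerListB ∨ ∃ k : Nat, k < 8 ∧ ∃ c ∈ ("ACGT".toList), w.set k c ∈ pvKmerListB) := by
    simp only [Bool.or_eq_true, List.any_eq_true, pvContains_iff, PySem.List.mem_pyRange_one]
    apply or_congr Iff.rfl
    constructor
    · rintro ⟨k, ⟨hk0, hk8⟩, c, hc, hmem⟩
      refine ⟨k.toNat, by omega, c, hc, ?_⟩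
      rwa [pvNeighbor_eq w hw k hk0 hk8 c] at hmem
    · rintro ⟨k, hk, c, hc, hmem⟩
      refine ⟨(k : Int), ⟨by omega, by omega⟩, c, hc, ?_⟩
      rw [pvNeighbor_eq w hw (k : Int) (by omega) (by omega) c]
      simpa using hmem
  have hbr : (∃ pw ∈ pvKmerListB, 7 ≤ pvMatchesA w pw) ↔
      (w ∈ pvKmerListB ∨ ∃ k : Nat, k < 8 ∧ ∃ c ∈ ("ACGT".toList), w.set k c ∈ pvKmerListB) := by
    constructor
    · rintro ⟨pw, hpw, h7⟩
      have hlen := pvKmer_len pw hpw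
      obtain ⟨k, hk, hset⟩ := pvMatches_decomp w pw (by omega) (by omega) (by omega)
      right
      refine ⟨k, by omega, pw.getD k ' ', pvKmer_acgt pw hpw k (by omega), ?_⟩
      rw [hset]; exact hpw
    · rintro (hmem | ⟨k, hk, c, -, hmem⟩)
      · exact ⟨w, hmem, by rw [pvMatches_refl, hw]; omega⟩
      · refine ⟨w.set k c, hmem, ?_⟩
        have := pvMatches_set w k c (by omega)
        omega
  exact Bool.coe_iff_coe.mp (hA.trans (hbr.trans hB.symm))

-- ===== VERDICT (by name: the statement is the Claim_ definition above) =====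
theorem has_problematic_motifs_spec : Claim_equal_has_problematic_motifs := by
  intro sequence _
  unfold Spec_has_problematic_motifs
  simp only [has_problematic_motifs, has_problematic_motifs_alt]
  generalize (PySem.Str.upper sequence).toList = s
  rw [pvBad_split]
  by_cases h1 : pvSitesA.any (fun site => PySem.Chars.isIn site s) = true
  · simp [h1]
  · by_cases h2 : pvMotifsA.any (fun motif => PySem.Chars.isIn motif s) = true
    · simp [h1, h2]
    · have e1 : pvSitesA.any (fun site => PySem.Chars.isIn site s) = false := by
        simpa using h1
      have e2 : pvMotifsA.any (fun motif => PySem.Chars.isIn motif s) = false := by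
        simpa using h2
      rw [e1, e2]
      simp only [Bool.false_or, Bool.false_eq_true, if_false]
      have e3 : ∀ X : Bool, pvPrimersA.any (fun _ => X) = X := by
        intro X; simp [pvPrimersA]
      rw [e3]
      congr 1
      apply PySem.List.any_congr_mem
      intro i hi
      rw [PySem.List.mem_pyRange_one] at hi
      rw [PySem.List.len_eq] at hi
      have hwlen : (PySem.List.slice s (some i) (some (i + 8))).length = 8 := by
        rw [PySem.List.slice_toNat s hi.1 (by omega)]
        simp only [List.length_take, List.length_drop]
        omega
      exact pvWindow_eq _ hwlen
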